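-- pv_equiv track=rewrite | github.com/prayas-energy/Rumi | rumi/io/loaders.py | strip_trailing
-- ===== SOURCE A (Python) =====
-- def strip_trailing(row):
--     """Strips every field in the row.
--     removes trailing empty fields if any.
--     """
--     stripped = [item.strip() for item in row]
--
--     lastnonemepty_index = 0
--     for i, item in enumerate(stripped[::-1], start=1):
--         if item:
--             lastnonemepty_index = i
--             break
--
--     if lastnonemepty_index == 0:
--         return []
--     else:
--         return stripped[:len(stripped)-lastnonemepty_index+1]
-- ===== SOURCE B (Python) =====
-- def strip_trailing(row):
--     """Strips every field in the row.
--     removes trailing empty fields if any.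
--     """
--     stripped = [item.strip() for item in row]
--     last = -1
--     for i, item in enumerate(stripped):
--         if item:
--             last = i
--     return stripped[:last + 1]
-- ===== Notes on version B (the rewrite author's own statement) =====
-- stated objective: simpler
-- what changed: Replaces A's reverse scan with break and sentinel index arithmetic by one forward pass tracking the last non-empty index (-1 if none), then a single stripped[:last+1] truncation.
import Mathlib
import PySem

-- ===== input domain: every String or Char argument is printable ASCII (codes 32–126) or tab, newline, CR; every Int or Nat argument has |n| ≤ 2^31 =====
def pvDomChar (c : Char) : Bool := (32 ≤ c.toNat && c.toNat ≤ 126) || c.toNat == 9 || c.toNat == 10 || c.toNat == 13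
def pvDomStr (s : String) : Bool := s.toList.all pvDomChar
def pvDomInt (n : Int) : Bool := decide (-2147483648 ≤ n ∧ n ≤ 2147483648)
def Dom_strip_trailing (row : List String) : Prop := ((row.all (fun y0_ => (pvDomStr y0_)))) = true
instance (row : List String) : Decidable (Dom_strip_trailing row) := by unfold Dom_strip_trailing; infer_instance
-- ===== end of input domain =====

-- B replaces A's reverse scan + break + sentinel index arithmetic with one forward
-- pass tracking the last non-empty index, then a single truncation (objective: simpler).

-- ===== PORT A =====
-- the for-loop with break over enumerate(stripped[::-1], start=1)
def stripA_find : List String → Int → Int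
  | [], _ => 0
  | x :: xs, i => if x ≠ "" then i else stripA_find xs (i + 1)

def strip_trailing (row : List String) : List String :=
  let stripped := row.map PySem.Str.strip
  let lastnonemepty_index := stripA_find stripped.reverse 1
  if lastnonemepty_index = 0 then []
  else PySem.List.slice stripped none (some ((stripped.length : Int) - lastnonemepty_index + 1))

-- ===== PORT B =====
def strip_trailing_alt (row : List String) : List String :=
  let stripped := row.map PySem.Str.strip
  let last := (PySem.List.enumerate stripped).foldl
      (fun acc p => if p.2 ≠ "" then p.1 else acc) (-1)
  PySem.List.slice stripped none (some (last + 1))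

-- ===== PRECONDITION & SPEC =====
def Spec_strip_trailing (row : List String) (out : List String) : Prop := out = strip_trailing_alt row
instance (row : List String) (out : List String) : Decidable (Spec_strip_trailing row out) := by unfold Spec_strip_trailing; infer_instance

-- ===== CLAIM (what is proved, stated in full; the proofs are below) =====
def Claim_equal_strip_trailing : Prop := ∀ (row : List String), Dom_strip_trailing row → Spec_strip_trailing row (strip_trailing row)

-- ===== LEMMAS AND PROOFS =====

-- A's reverse scan, characterised by findIdx? on the reversed list
lemma stripA_find_eq (xs : List String) (i : Int) :
    stripA_find xs i = match xs.findIdx? (fun x => x ≠ "") with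
      | none => 0
      | some k => i + k := by
  induction xs generalizing i with
  | nil => simp [stripA_find]
  | cons x xs ih =>
    by_cases hx : x = ""
    · simp [stripA_find, hx, List.findIdx?_cons, ih]
      cases List.findIdx? (fun x => !decide (x = "")) xs with
      | none => simp
      | some k => simp; ring
    · simp [stripA_find, hx, List.findIdx?_cons]

-- B's forward fold, characterised on a snoc
lemma foldB_snoc (s : List String) (x : String) (d : Int) (j : Int) :
    (PySem.List.enumerate (s ++ [x]) j).foldl (fun acc p => if p.2 ≠ "" then p.1 else acc) d
      = if x ≠ "" then j + s.length
        else (PySem.List.enumerate s j).foldl (fun acc p => if p.2 ≠ "" then p.1 else acc) d := by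
  induction s generalizing d j with
  | nil => simp [PySem.List.enumerate_cons, PySem.List.enumerate_nil]
  | cons y ys ih =>
    simp only [List.cons_append, PySem.List.enumerate_cons, List.foldl_cons, ih]
    by_cases hx : x = "" <;> simp [hx] <;> ring_nf

-- B's fold = position of the last non-empty element, via findIdx? on the reverse
lemma foldB_eq_findIdx (s : List String) :
    (PySem.List.enumerate s).foldl (fun acc p => if p.2 ≠ "" then p.1 else acc) (-1)
      = match s.reverse.findIdx? (fun x => x ≠ "") with
        | none => -1
        | some k => (s.length : Int) - 1 - k := by
  induction s using List.reverseRecOn with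
  | nil => simp [PySem.List.enumerate_nil]
  | append_singleton s x ih =>
    rw [foldB_snoc s x (-1) 0, List.reverse_append]
    by_cases hx : x = ""
    · simp only [hx, ne_eq, not_true_eq_false, if_false, List.reverse_singleton,
        List.singleton_append, List.findIdx?_cons, decide_not, decide_true, Bool.not_true, ih]
      cases List.findIdx? (fun x => !decide (x = "")) s.reverse with
      | none => simp
      | some k => simp [List.length_append]; ring
    · simp [hx, List.findIdx?_cons]

-- the core equality, on the already-stripped list
lemma core_eq (s : List String) :
    (if stripA_find s.reverse 1 = 0 then []
     else PySem.List.slice s none (some ((s.length : Int) - stripA_find s.reverse 1 + 1)))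
    = PySem.List.slice s none
        (some ((PySem.List.enumerate s).foldl (fun acc p => if p.2 ≠ "" then p.1 else acc) (-1) + 1)) := by
  rw [stripA_find_eq, foldB_eq_findIdx]
  cases h : s.reverse.findIdx? (fun x => x ≠ "") with
  | none =>
    show (if (0 : Int) = 0 then _ else _) = PySem.List.slice s none (some ((-1 : Int) + 1))
    rw [if_pos rfl, show ((-1 : Int) + 1) = ((0 : Nat) : Int) by norm_num,
      PySem.List.slice_to_natCast]
    simp
  | some k =>
    show (if (1 + (k : Int)) = 0 then _ else _)
        = PySem.List.slice s none (some ((s.length : Int) - 1 - k + 1))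
    rw [if_neg (by omega)]
    congr 2
    ring

theorem strip_trailing_spec : Claim_equal_strip_trailing := by
  intro row _
  unfold Spec_strip_trailing strip_trailing strip_trailing_alt
  exact core_eq (row.map PySem.Str.strip)
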